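-- pv_equiv track=rewrite | github.com/AlexandrNikitenko97/Python_Tasks | TriangleNumbers.py | stick
-- ===== SOURCE A (Python) =====
-- def stick(n):
--     chain = []
--     num = 0
--     iteration = 1
--     while num <= n:
--         chain.append(num)
--         num += iteration
--         iteration += 1
--     count = 0
--     chain.remove(0)
--     for i in chain:
--         result = []
--         count += 1
--         for j in range(count, len(chain)):
--             result.append(chain[j-1])
--             result.append(chain[j])
--             i += chain[j]
--             if i == n:
--                 return sorted(list(set(result)))
--     return []
-- ===== SOURCE B (Python) =====
-- def stick(n):
--     # sliding-window (two-pointer) search over the triangular numbers <= n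
--     tris = []
--     k = 1
--     t = 1
--     while t <= n:
--         tris.append(t)
--         k += 1
--         t += k
--     m = len(tris)
--     total = 0
--     e = 0
--     for s in range(m):
--         while e < m and total < n:
--             total += tris[e]
--             e += 1
--         if total == n and e - s >= 2:
--             return tris[s:e]
--         total -= tris[s]
--     return []
-- ===== Notes on version B (the rewrite author's own statement) =====
-- stated objective: faster
-- what changed: A scans every start index and re-sums the run from scratch (and rebuilds the run via repeated appends plus set/sort); B generates the triangular numbers once by the closed-form increment and finds the run with a single sliding-window (two-pointer) pass, returning a slice.
import Mathlib
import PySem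

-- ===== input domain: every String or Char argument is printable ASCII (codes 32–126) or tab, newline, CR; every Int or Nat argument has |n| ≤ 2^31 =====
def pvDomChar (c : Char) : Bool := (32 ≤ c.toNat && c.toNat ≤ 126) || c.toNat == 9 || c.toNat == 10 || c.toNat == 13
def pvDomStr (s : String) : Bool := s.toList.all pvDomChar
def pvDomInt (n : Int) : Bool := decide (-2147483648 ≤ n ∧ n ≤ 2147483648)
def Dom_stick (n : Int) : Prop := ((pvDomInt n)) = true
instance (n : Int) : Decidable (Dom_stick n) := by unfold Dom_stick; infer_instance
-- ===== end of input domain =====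

-- B replaces A's restart-the-sum-at-every-start scan by one sliding-window pass over the
-- triangular numbers (faster); equivalence is about the return value only.

-- ===== PORT A =====
-- while num <= n: chain.append(num); num += iteration; iteration += 1   (iteration = k+1)
def stickChain (n num : Int) (k : Nat) (acc : List Int) : List Int :=
  if num ≤ n then stickChain n (num + ((k : Int) + 1)) (k + 1) (acc ++ [num]) else acc
termination_by (n + 1 - num).toNat
decreasing_by omega

-- the inner 'for j in range(count, len(chain))' loop; 'some v' on 'return', none when it ends
def stickInner (chain : List Int) (n : Int) (j : Nat) (result : List Int) (i : Int) :
    Option (List Int) :=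
  if j < chain.length then
    let result := result ++ [PySem.List.pyGetD chain ((j : Int) - 1) 0,
                             PySem.List.pyGetD chain (j : Int) 0]
    let i := i + PySem.List.pyGetD chain (j : Int) 0
    if i = n then some (PySem.List.sorted (PySem.Set.ofList result) (fun x => x) false)
    else stickInner chain n (j + 1) result i
  else none
termination_by chain.length - j

-- 'for i in chain' with the count variable
def stickOuter (chain : List Int) (n : Int) (rest : List Int) (count : Nat) : List Int :=
  match rest with
  | [] => []
  | i :: rest' =>
    match stickInner chain n (count + 1) [] i with
    | some v => v
    | none => stickOuter chain n rest' (count + 1)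

def stick (n : Int) : List Int :=
  let chain := stickChain n 0 0 []
  -- chain.remove(0) raises ValueError on negative n (empty chain); excluded by Pre_stick
  let chain := (PySem.List.remove? chain 0).getD []
  stickOuter chain n chain 0

-- ===== PORT B =====
-- while t <= n: tris.append(t); k += 1; t += k
def triB (n : Int) (k : Nat) (t : Int) (acc : List Int) : List Int :=
  if t ≤ n then triB n (k + 1) (t + ((k : Int) + 1)) (acc ++ [t]) else acc
termination_by (n + 1 - t).toNat
decreasing_by omega

-- the inner 'while e < m and total < n' loop of B
def windAdv (tris : List Int) (n : Int) (e : Nat) (total : Int) : Nat × Int :=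
  if e < tris.length then
    if total < n then windAdv tris n (e + 1) (total + PySem.List.pyGetD tris (e : Int) 0)
    else (e, total)
  else (e, total)
termination_by tris.length - e

-- the 'for s in range(m)' loop of B
def altLoop (tris : List Int) (n : Int) (s e : Nat) (total : Int) : List Int :=
  if s < tris.length then
    let p := windAdv tris n e total
    if p.2 = n ∧ (2 : Int) ≤ (p.1 : Int) - (s : Int) then
      PySem.List.slice tris (some (s : Int)) (some (p.1 : Int))
    else altLoop tris n (s + 1) p.1 (p.2 - PySem.List.pyGetD tris (s : Int) 0)
  else []
termination_by tris.length - s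

def stick_alt (n : Int) : List Int :=
  let tris := triB n 1 1 []
  altLoop tris n 0 0 0

-- ===== PRECONDITION & SPEC =====
-- Pre_ excludes exactly the negative inputs, on which A raises ValueError (chain.remove on an empty chain)
def Pre_stick (n : Int) : Prop := 0 ≤ n
instance (n : Int) : Decidable (Pre_stick n) := by unfold Pre_stick; infer_instance
def pvWitness_stick : Int := (10)

def Spec_stick (n : Int) (out : List Int) : Prop := out = stick_alt n
instance (n : Int) (out : List Int) : Decidable (Spec_stick n out) := by unfold Spec_stick; infer_instance

-- ===== CLAIM (what is proved, stated in full; the proofs are below) =====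
def Claim_equal_stick : Prop := ∀ (n : Int), Dom_stick n → Pre_stick n → Spec_stick n (stick n)

-- ===== LEMMAS AND PROOFS =====

-- the segment L[a:b] and its sum
def seg (L : List Int) (a b : Nat) : List Int := (L.drop a).take (b - a)
def sS (L : List Int) (a b : Nat) : Int := (seg L a b).sum

lemma seg_self (L : List Int) (a : Nat) : seg L a a = [] := by
  simp [seg]

lemma seg_succ (L : List Int) (a b : Nat) (hab : a ≤ b) (hb : b < L.length) :
    seg L a (b + 1) = seg L a b ++ [L.getD b 0] := by
  unfold seg
  have h1 : b + 1 - a = (b - a) + 1 := by omega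
  rw [h1, List.take_add_one]
  congr 1
  have h2 : b - a < (L.drop a).length := by simp; omega
  rw [List.getElem?_eq_getElem h2]
  simp only [Option.toList_some, List.getElem_drop]
  rw [List.getD_eq_getElem L 0 (by omega)]
  congr 2
  omega

lemma sS_self (L : List Int) (a : Nat) : sS L a a = 0 := by simp [sS, seg_self]

lemma sS_succ (L : List Int) (a b : Nat) (hab : a ≤ b) (hb : b < L.length) :
    sS L a (b + 1) = sS L a b + L.getD b 0 := by
  simp [sS, seg_succ L a b hab hb]

lemma mem_seg (L : List Int) (a b : Nat) (x : Int) (hx : x ∈ seg L a b) : x ∈ L := by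
  exact List.mem_of_mem_drop (List.mem_of_mem_take hx)

lemma sS_nonneg (L : List Int) (hpos : ∀ x ∈ L, 1 ≤ x) (a b : Nat) : 0 ≤ sS L a b := by
  apply List.sum_nonneg
  intro x hx
  exact le_trans (by norm_num) (hpos x (mem_seg L a b x hx))

lemma sS_split (L : List Int) (a b c : Nat) (hab : a ≤ b) (hbc : b ≤ c) (hc : c ≤ L.length) :
    sS L a c = sS L a b + sS L b c := by
  revert hc
  induction c, hbc using Nat.le_induction with
  | base => intro _; rw [sS_self]; omega
  | succ c hbc ih =>
    intro hc
    rw [sS_succ L a c (by omega) (by omega), sS_succ L b c (by omega) (by omega),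
      ih (by omega)]
    omega

lemma sS_head (L : List Int) (a b : Nat) (hab : a < b) (hb : b ≤ L.length) :
    sS L a b = L.getD a 0 + sS L (a + 1) b := by
  rw [sS_split L a (a + 1) b (by omega) (by omega) hb,
    sS_succ L a a le_rfl (by omega), sS_self]
  omega

lemma sS_pos (L : List Int) (hpos : ∀ x ∈ L, 1 ≤ x) (a b : Nat) (hab : a < b)
    (hb : b ≤ L.length) : 1 ≤ sS L a b := by
  rw [sS_head L a b hab hb]
  have h1 : 1 ≤ L.getD a 0 := by
    have : L.getD a 0 ∈ L := by
      rw [List.getD_eq_getElem L 0 (by omega)]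
      exact List.getElem_mem _
    exact hpos _ this
  have := sS_nonneg L hpos (a + 1) b
  omega

lemma sS_mono (L : List Int) (hpos : ∀ x ∈ L, 1 ≤ x) (a b c : Nat) (hab : a ≤ b)
    (hbc : b ≤ c) (hc : c ≤ L.length) : sS L a b ≤ sS L a c := by
  rw [sS_split L a b c hab hbc hc]
  have := sS_nonneg L hpos b c
  omega

lemma seg_pairwise (L : List Int) (hL : L.Pairwise (· < ·)) (a b : Nat) :
    (seg L a b).Pairwise (· < ·) := by
  exact List.Pairwise.sublist ((List.take_sublist _ _).trans (List.drop_sublist _ _)) hL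

lemma lt_getD_of_mem_seg (L : List Int) (hL : L.Pairwise (· < ·)) (a b : Nat)
    (hb : b < L.length) (x : Int) (hx : x ∈ seg L a b) : x < L.getD b 0 := by
  have hx' : x ∈ (L.take b).drop a := by
    rw [List.drop_take]; exact hx
  have hx'' : x ∈ L.take b := List.mem_of_mem_drop hx'
  obtain ⟨i, hi, rfl⟩ := List.mem_iff_getElem.mp hx''
  have hib : i < b := by
    have := List.length_take_le b L
    simp at hi
    omega
  rw [List.getElem_take, List.getD_eq_getElem L 0 hb]
  exact List.pairwise_iff_getElem.mp hL i b (by simp at hi; omega) hb hib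

-- set(xs ++ [v])
lemma ofList_append_singleton (xs : List Int) (v : Int) :
    PySem.Set.ofList (xs ++ [v]) =
      if v ∈ xs then PySem.Set.ofList xs else PySem.Set.ofList xs ++ [v] := by
  have h : PySem.Set.ofList (xs ++ [v]) = PySem.Set.add (PySem.Set.ofList xs) v := by
    simp only [PySem.Set.ofList, List.foldl_append, List.foldl_cons, List.foldl_nil]
  rw [h]
  unfold PySem.Set.add
  by_cases hv : v ∈ xs
  · rw [if_pos hv, if_pos]
    simp [PySem.Set.mem_ofList, hv]
  · rw [if_neg hv, if_neg]
    simp [PySem.Set.mem_ofList, hv]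

-- chain construction --------------------------------------------------------

lemma triB_eq_append (fuel : Nat) : ∀ (n : Int) (k : Nat) (t : Int) (acc : List Int),
    (n + 1 - t).toNat ≤ fuel → triB n k t acc = acc ++ triB n k t [] := by
  induction fuel with
  | zero =>
    intro n k t acc hf
    rw [triB, if_neg (by omega)]
    conv_rhs => rw [triB]
    rw [if_neg (by omega)]
    simp
  | succ fuel ih =>
    intro n k t acc hf
    by_cases h : t ≤ n
    · rw [triB, if_pos h,
        ih n (k + 1) (t + ((k : Int) + 1)) (acc ++ [t]) (by omega)]
      conv_rhs => rw [triB]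
      rw [if_pos h]
      simp only [List.nil_append]
      rw [ih n (k + 1) (t + ((k : Int) + 1)) [t] (by omega)]
      simp
    · rw [triB, if_neg h]
      conv_rhs => rw [triB]
      rw [if_neg h]
      simp

lemma stickChain_eq_triB (fuel : Nat) : ∀ (n num : Int) (k : Nat) (acc : List Int),
    (n + 1 - num).toNat ≤ fuel → stickChain n num k acc = triB n k num acc := by
  induction fuel with
  | zero =>
    intro n num k acc hf
    rw [stickChain, triB, if_neg (by omega), if_neg (by omega)]
  | succ fuel ih =>
    intro n num k acc hf
    rw [stickChain, triB]
    by_cases h : num ≤ n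
    · rw [if_pos h, if_pos h]
      exact ih n (num + ((k : Int) + 1)) (k + 1) (acc ++ [num]) (by omega)
    · rw [if_neg h, if_neg h]

lemma chain_eq (n : Int) (hn : 0 ≤ n) : stickChain n 0 0 [] = 0 :: triB n 1 1 [] := by
  rw [stickChain, if_pos hn]
  norm_num
  rw [stickChain_eq_triB (n + 1 - 1).toNat n 1 1 [0] le_rfl,
    triB_eq_append (n + 1 - 1).toNat n 1 1 [0] le_rfl]
  simp

lemma triB_inv (fuel : Nat) : ∀ (n : Int) (k : Nat) (t : Int) (acc : List Int),
    (n + 1 - t).toNat ≤ fuel → 1 ≤ t →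
    (∀ x ∈ acc, 1 ≤ x ∧ x ≤ n ∧ x < t) → acc.Pairwise (· < ·) →
    ((triB n k t acc).Pairwise (· < ·) ∧ ∀ x ∈ triB n k t acc, 1 ≤ x ∧ x ≤ n) := by
  induction fuel with
  | zero =>
    intro n k t acc hf ht hacc hp
    rw [triB, if_neg (by omega)]
    exact ⟨hp, fun x hx => ⟨(hacc x hx).1, (hacc x hx).2.1⟩⟩
  | succ fuel ih =>
    intro n k t acc hf ht hacc hp
    rw [triB]
    by_cases h : t ≤ n
    · rw [if_pos h]
      apply ih n (k + 1) (t + ((k : Int) + 1)) (acc ++ [t]) (by omega) (by omega)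
      · intro x hx
        rcases List.mem_append.mp hx with hx | hx
        · have := hacc x hx; refine ⟨this.1, this.2.1, by omega⟩
        · simp at hx; subst hx; refine ⟨ht, h, by omega⟩
      · rw [List.pairwise_append]
        refine ⟨hp, by simp, ?_⟩
        intro x hx y hy
        simp at hy; subst hy
        exact (hacc x hx).2.2
    · rw [if_neg h]
      exact ⟨hp, fun x hx => ⟨(hacc x hx).1, (hacc x hx).2.1⟩⟩

-- A's inner loop ------------------------------------------------------------

lemma inner_none (L : List Int) (n : Int) (fuel : Nat) :
    ∀ (j : Nat) (result : List Int) (i : Int), L.length - j ≤ fuel →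
    (∀ jj, j ≤ jj → jj < L.length → i + sS L j (jj + 1) ≠ n) →
    stickInner L n j result i = none := by
  induction fuel with
  | zero =>
    intro j result i hf hne
    rw [stickInner, if_neg (by omega)]
  | succ fuel ih =>
    intro j result i hf hne
    rw [stickInner]
    by_cases h : j < L.length
    · rw [if_pos h]
      simp only [PySem.List.pyGetD_natCast]
      have hgj : sS L j (j + 1) = L.getD j 0 := by
        rw [sS_succ L j j le_rfl h, sS_self]; omega
      rw [if_neg (by have := hne j le_rfl h; omega)]
      apply ih (j + 1) _ _ (by omega)
      intro jj hjj hjjl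
      have := hne jj (by omega) hjjl
      rw [sS_head L j (jj + 1) (by omega) (by omega)] at this
      omega
    · rw [if_neg h]

lemma inner_some (L : List Int) (n : Int) (hL : L.Pairwise (· < ·)) (fuel : Nat) :
    ∀ (j : Nat) (result : List Int) (i : Int) (a h : Nat), L.length - j ≤ fuel →
    a < j → j ≤ h → h < L.length →
    PySem.Set.ofList (result ++ [L.getD (j - 1) 0]) = seg L a j →
    i + sS L j (h + 1) = n →
    (∀ jj, j ≤ jj → jj < h → i + sS L j (jj + 1) ≠ n) →
    stickInner L n j result i = some (seg L a (h + 1)) := by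
  induction fuel with
  | zero =>
    intro j result i a h hf haj hjh hh hinv hhit hmin
    omega
  | succ fuel ih =>
    intro j result i a h hf haj hjh hh hinv hhit hmin
    have hjlen : j < L.length := by omega
    rw [stickInner, if_pos hjlen]
    have hcast : (j : Int) - 1 = ((j - 1 : Nat) : Int) := by omega
    rw [hcast]
    simp only [PySem.List.pyGetD_natCast]
    have hgj : sS L j (j + 1) = L.getD j 0 := by
      rw [sS_succ L j j le_rfl hjlen, sS_self]; omega
    -- the set of the grown result list is the segment L[a:j+1]
    have hfresh : L.getD j 0 ∉ result ++ [L.getD (j - 1) 0] := by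
      intro hmem
      have : L.getD j 0 ∈ seg L a j := by
        rw [← hinv]
        exact (PySem.Set.mem_ofList _ _).mpr hmem
      exact absurd (lt_getD_of_mem_seg L hL a j hjlen _ this) (lt_irrefl _)
    have hset : PySem.Set.ofList (result ++ [L.getD (j - 1) 0, L.getD j 0]) =
        seg L a (j + 1) := by
      have e1 : result ++ [L.getD (j - 1) 0, L.getD j 0] =
          (result ++ [L.getD (j - 1) 0]) ++ [L.getD j 0] := by simp
      rw [e1, ofList_append_singleton, if_neg hfresh, hinv,
        seg_succ L a j (by omega) hjlen]
    by_cases hcase : j = h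
    · subst hcase
      rw [if_pos (by omega)]
      congr 1
      rw [hset]
      exact PySem.List.sorted_eq_of_perm_of_pairwise_lt _ _ _ (List.Perm.refl _)
        (by simpa using seg_pairwise L hL a (j + 1))
    · have hjh' : j < h := by omega
      rw [if_neg (by have := hmin j le_rfl hjh'; omega)]
      apply ih (j + 1) _ _ a h (by omega) (by omega) (by omega) hh
      · have e2 : (j + 1 : Nat) - 1 = j := by omega
        rw [e2]
        rw [ofList_append_singleton, if_pos (by simp), hset]
      · rw [sS_head L j (h + 1) (by omega) (by omega)] at hhit
        omega
      · intro jj hjj hjjh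
        have := hmin jj (by omega) hjjh
        rw [sS_head L j (jj + 1) (by omega) (by omega)] at this
        omega

-- B's window advance --------------------------------------------------------

lemma windAdv_spec (L : List Int) (n : Int) (fuel : Nat) :
    ∀ (s e : Nat) (total : Int), L.length - e ≤ fuel → s ≤ e → e ≤ L.length →
    total = sS L s e → (∀ j, s ≤ j → j < e → sS L s j < n) →
    s ≤ (windAdv L n e total).1 ∧ (windAdv L n e total).1 ≤ L.length ∧
    (windAdv L n e total).2 = sS L s (windAdv L n e total).1 ∧
    (∀ j, s ≤ j → j < (windAdv L n e total).1 → sS L s j < n) ∧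
    ((windAdv L n e total).1 = L.length ∨ n ≤ (windAdv L n e total).2) := by
  induction fuel with
  | zero =>
    intro s e total hf hse hel htot hmin
    have he : e = L.length := by omega
    rw [windAdv, if_neg (by omega)]
    exact ⟨hse, hel, htot, hmin, Or.inl he⟩
  | succ fuel ih =>
    intro s e total hf hse hel htot hmin
    rw [windAdv]
    by_cases h : e < L.length
    · rw [if_pos h]
      by_cases h2 : total < n
      · rw [if_pos h2]
        simp only [PySem.List.pyGetD_natCast]
        apply ih s (e + 1) _ (by omega) (by omega) (by omega)
        · rw [htot, sS_succ L s e hse h]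
        · intro j hsj hje
          rcases Nat.lt_or_ge j e with hj | hj
          · exact hmin j hsj hj
          · have : j = e := by omega
            subst this
            omega
      · rw [if_neg h2]
        exact ⟨hse, hel, htot, hmin, Or.inr (by omega)⟩
    · rw [if_neg h]
      exact ⟨hse, hel, htot, hmin, Or.inl (by omega)⟩

-- main loop correspondence --------------------------------------------------

lemma outer_eq (L : List Int) (n : Int) (hpos : ∀ x ∈ L, 1 ≤ x) (hle : ∀ x ∈ L, x ≤ n)
    (hL : L.Pairwise (· < ·)) (fuel : Nat) :
    ∀ (s e : Nat) (total : Int), L.length - s ≤ fuel → s ≤ e → e ≤ L.length →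
    total = sS L s e → (∀ j, s ≤ j → j < e → sS L s j < n) →
    stickOuter L n (L.drop s) s = altLoop L n s e total := by
  induction fuel with
  | zero =>
    intro s e total hf hse hel htot hmin
    have hs : L.length ≤ s := by omega
    rw [List.drop_eq_nil_of_le hs, stickOuter, altLoop, if_neg (by omega)]
  | succ fuel ih =>
    intro s e total hf hse hel htot hmin
    by_cases hs : s < L.length
    · -- head of the remaining chain is L[s]
      have hdrop : L.drop s = L.getD s 0 :: L.drop (s + 1) := by
        rw [List.getD_eq_getElem L 0 hs]
        exact List.drop_eq_getElem_cons hs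
      rw [hdrop, stickOuter, altLoop, if_pos hs]
      simp only [PySem.List.pyGetD_natCast]
      obtain ⟨hw1, hw2, hw3, hw4, hw5⟩ :=
        windAdv_spec L n (L.length - e) s e total le_rfl hse hel htot hmin
      set e' := (windAdv L n e total).1 with he'
      set total' := (windAdv L n e total).2 with htotal'
      have hn1 : 1 ≤ n := by
        have h1 : L.getD s 0 ∈ L := by
          rw [List.getD_eq_getElem L 0 hs]; exact List.getElem_mem _
        have := hpos _ h1
        have := hle _ h1
        omega
      have hse' : s + 1 ≤ e' := by
        by_contra hc
        have : e' = s := by omega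
        rw [this] at hw3
        rw [sS_self] at hw3
        rcases hw5 with h5 | h5
        · omega
        · omega
      by_cases hbr : total' = n ∧ (2 : Int) ≤ (e' : Int) - (s : Int)
      · -- the window [s, e') is A's first hit
        rw [if_pos hbr]
        have hee : s + 2 ≤ e' := by omega
        have hinner : stickInner L n (s + 1) [] (L.getD s 0) =
            some (seg L s (e' - 1 + 1)) := by
          apply inner_some L n hL (L.length - (s + 1)) (s + 1) [] _ s (e' - 1) le_rfl
            (by omega) (by omega) (by omega)
          · have e1 : s + 1 - 1 = s := by omega
            rw [e1]
            have e2 : ([] : List Int) ++ [L.getD s 0] = [L.getD s 0] := by simp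
            rw [e2]
            have e3 : seg L s (s + 1) = seg L s s ++ [L.getD s 0] :=
              seg_succ L s s le_rfl hs
            rw [e3, seg_self]
            simp [PySem.Set.ofList, PySem.Set.add, PySem.Set.empty]
          · have e4 : e' - 1 + 1 = e' := by omega
            rw [e4, ← sS_head L s e' (by omega) hw2]
            omega
          · intro jj hjj hjjh
            have h5 := hw4 (jj + 1) (by omega) (by omega)
            rw [sS_head L s (jj + 1) (by omega) (by omega)] at h5
            omega
        rw [hinner]
        have e4 : e' - 1 + 1 = e' := by omega
        rw [e4]
        rw [PySem.List.slice_natCast]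
        rfl
      · -- no hit starting at s: A's inner loop runs dry
        rw [if_neg hbr]
        have hinner : stickInner L n (s + 1) [] (L.getD s 0) = none := by
          apply inner_none L n (L.length - (s + 1)) (s + 1) [] _ le_rfl
          intro jj hjj hjjl
          rw [← sS_head L s (jj + 1) (by omega) (by omega)]
          -- show sS L s (jj + 1) ≠ n
          rcases hw5 with h5 | h5
          · -- e' = L.length and (if total' were ≥ n the branch analysis differs)
            rcases Nat.lt_or_ge (jj + 1) e' with hj | hj
            · have := hw4 (jj + 1) (by omega) hj
              omega
            · -- jj + 1 ≥ e' = L.length, so jj + 1 = L.length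
              have hj1 : jj + 1 = e' := by omega
              rw [hj1, ← hw3]
              rcases lt_trichotomy total' n with hlt | heq | hgt
              · omega
              · -- total' = n but window too short: e' ≤ s + 1, so e' = s + 1
                exfalso
                have he1 : e' = s + 1 := by
                  rcases not_and_or.mp hbr with hc | hc
                  · exact absurd heq hc
                  · omega
                omega
              · omega
          · -- n ≤ total'
            rcases lt_trichotomy total' n with hlt | heq | hgt
            · omega
            · -- total' = n, so the branch failed because e' = s + 1 (single term)
              have he1 : e' = s + 1 := by
                rcases not_and_or.mp hbr with hc | hc
                · exact absurd heq hc
                · omega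
              rcases Nat.lt_or_ge (jj + 1) e' with hj | hj
              · omega
              · have hsplit : sS L s (jj + 1) = sS L s e' + sS L e' (jj + 1) :=
                  sS_split L s e' (jj + 1) (by omega) (by omega) (by omega)
                rcases Nat.eq_or_lt_of_le hj with hj2 | hj2
                · rw [← hj2] at hsplit
                  rw [hsplit, sS_self] at *
                  omega
                · have hps := sS_pos L hpos e' (jj + 1) (by omega) (by omega)
                  rw [hsplit, ← hw3, heq]
                  omega
            · -- total' > n: sums only grow past e'
              rcases Nat.lt_or_ge (jj + 1) e' with hj | hj
              · have := hw4 (jj + 1) (by omega) hj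
                omega
              · have := sS_mono L hpos s e' (jj + 1) (by omega) hj (by omega)
                rw [← hw3] at this
                omega
        rw [hinner]
        apply ih (s + 1) e' (total' - L.getD s 0) (by omega) hse' hw2
        · rw [hw3, sS_head L s e' (by omega) hw2]
          omega
        · intro j hsj hje
          have h6 := hw4 j (by omega) hje
          rw [sS_head L s j (by omega) (by omega)] at h6
          have h7 := hpos (L.getD s 0) (by rw [List.getD_eq_getElem L 0 hs]; exact List.getElem_mem _)
          omega
    · rw [List.drop_eq_nil_of_le (by omega), stickOuter, altLoop, if_neg hs]

-- ===== VERDICT (by name: the statement is the Claim_ definition above) =====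
theorem stick_spec : Claim_equal_stick := by
  intro n _ hn
  unfold Spec_stick stick stick_alt
  simp only [chain_eq n hn, PySem.List.remove?_cons_self, Option.getD_some]
  have hprops := triB_inv ((n + 1 - 1).toNat) n 1 1 [] le_rfl (by norm_num) (by simp) (by simp)
  have h0 := outer_eq (triB n 1 1 []) n (fun x hx => (hprops.2 x hx).1)
    (fun x hx => (hprops.2 x hx).2) hprops.1 (triB n 1 1 []).length 0 0 0 le_rfl le_rfl
    (by omega) (by rw [sS_self]) (by omega)
  simpa using h0
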